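-- pv_equiv track=rewrite | github.com/JeromeLefebvre/ProjectEuler | Problem107.py | addsNothing
-- ===== SOURCE A (Python) =====
-- def addsNothing(graph, vertex):
-- 	# Returns true if both the head and tail are already in the graph
-- 	head = vertex[0]
-- 	tail = vertex[1]
-- 	foundHead, foundTail = False, False
-- 	for k in graph:
-- 		if head in k:
-- 			foundHead = True
-- 		if tail in k:
-- 			foundTail = True
-- 		if foundTail and foundHead:
-- 			return True
-- 	return False
-- ===== SOURCE B (Python) =====
-- def addsNothing(graph, vertex):
--     # Two staged passes, each a structural recursion over the edge list:
--     # first decide whether the head occurs anywhere, then (only if it did)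
--     # whether the tail does. No flags, no combined scan.
--     def occurs(v, edges):
--         if not edges:
--             return False
--         return v in edges[0] or occurs(v, edges[1:])
--     return occurs(vertex[0], graph) and occurs(vertex[1], graph)
-- ===== Notes on version B (the rewrite author's own statement) =====
-- stated objective: alternative
-- what changed: Replaces A's single flag-tracking loop with early exit by two independent staged passes, each a structural recursion over the edge list answering one existential membership question; the result is their conjunction.
import Mathlib
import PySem

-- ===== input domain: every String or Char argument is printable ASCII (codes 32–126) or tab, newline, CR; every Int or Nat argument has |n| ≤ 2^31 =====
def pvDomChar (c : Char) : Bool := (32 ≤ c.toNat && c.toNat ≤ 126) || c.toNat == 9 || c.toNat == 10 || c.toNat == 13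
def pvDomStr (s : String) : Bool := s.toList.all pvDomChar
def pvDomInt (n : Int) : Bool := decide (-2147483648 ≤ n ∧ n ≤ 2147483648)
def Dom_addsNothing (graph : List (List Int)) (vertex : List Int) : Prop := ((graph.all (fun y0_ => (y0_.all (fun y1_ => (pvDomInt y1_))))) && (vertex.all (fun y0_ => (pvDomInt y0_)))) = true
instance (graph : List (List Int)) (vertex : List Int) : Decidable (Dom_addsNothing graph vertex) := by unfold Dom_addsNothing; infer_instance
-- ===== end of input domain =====

-- B replaces A's single flag-tracking scan by two independent recursive passes, one per endpoint.
-- ===== PORT A =====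
def addsALoop (head tail : Int) (foundHead foundTail : Bool) : List (List Int) → Bool
  | [] => false
  | k :: rest =>
    let foundHead' := if head ∈ k then true else foundHead
    let foundTail' := if tail ∈ k then true else foundTail
    if foundTail' && foundHead' then true
    else addsALoop head tail foundHead' foundTail' rest

def addsNothing (graph : List (List Int)) (vertex : List Int) : Bool :=
  match PySem.List.pyGet? vertex 0, PySem.List.pyGet? vertex 1 with
  | some head, some tail => addsALoop head tail false false graph
  | _, _ => false  -- IndexError: excluded by Pre_

-- ===== PORT B =====
def occursB (v : Int) : List (List Int) → Bool
  | [] => false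
  | k :: rest => (v ∈ k) || occursB v rest

def addsNothing_alt (graph : List (List Int)) (vertex : List Int) : Bool :=
  match vertex with
  | head :: tail :: _ => occursB head graph && occursB tail graph
  | _ => false  -- IndexError (vertex[0]/vertex[1]): excluded by Pre_

-- ===== PRECONDITION & SPEC =====
-- A raises IndexError (vertex[0]/vertex[1]) when vertex has fewer than two elements.
def Pre_addsNothing (graph : List (List Int)) (vertex : List Int) : Prop := 2 ≤ vertex.length
instance (graph : List (List Int)) (vertex : List Int) : Decidable (Pre_addsNothing graph vertex) := by unfold Pre_addsNothing; infer_instance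
def pvWitness_addsNothing : List (List Int) × List Int := ([[1, 2], [2, 3]], [1, 3])

def Spec_addsNothing (graph : List (List Int)) (vertex : List Int) (out : Bool) : Prop := out = addsNothing_alt graph vertex
instance (graph : List (List Int)) (vertex : List Int) (out : Bool) : Decidable (Spec_addsNothing graph vertex out) := by unfold Spec_addsNothing; infer_instance

-- ===== CLAIM (what is proved, stated in full; the proofs are below) =====
def Claim_equal_addsNothing : Prop := ∀ (graph : List (List Int)) (vertex : List Int), Dom_addsNothing graph vertex → Pre_addsNothing graph vertex → Spec_addsNothing graph vertex (addsNothing graph vertex)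

-- ===== LEMMAS AND PROOFS =====
theorem addsALoop_eq (head tail : Int) (fh ft : Bool) (graph : List (List Int))
    (hflags : (fh && ft) = false) :
    addsALoop head tail fh ft graph =
      ((fh || graph.any (fun k => decide (head ∈ k))) &&
       (ft || graph.any (fun k => decide (tail ∈ k)))) := by
  induction graph generalizing fh ft with
  | nil => cases fh <;> cases ft <;> simp_all [addsALoop]
  | cons k rest ih =>
    simp only [addsALoop, List.any_cons]
    by_cases hh : head ∈ k <;> by_cases ht : tail ∈ k <;>
      cases fh <;> cases ft <;> simp_all [ih]

theorem occursB_eq_any (v : Int) (graph : List (List Int)) :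
    occursB v graph = graph.any (fun k => decide (v ∈ k)) := by
  induction graph with
  | nil => rfl
  | cons k rest ih => simp [occursB, ih]

-- ===== VERDICT (by name: the statement is the Claim_ definition above) =====
theorem addsNothing_spec : Claim_equal_addsNothing := by
  intro graph vertex _ hpre
  unfold Spec_addsNothing addsNothing addsNothing_alt
  match vertex, hpre with
  | h :: t :: _, _ =>
    simp only [show ((0 : Int)) = ((0 : Nat) : Int) from rfl,
      show ((1 : Int)) = ((1 : Nat) : Int) from rfl, PySem.List.pyGet?_natCast,
      List.getElem?_cons_zero, List.getElem?_cons_succ]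
    rw [addsALoop_eq _ _ _ _ _ rfl, occursB_eq_any, occursB_eq_any]
    simp
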